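-- pv_equiv track=rewrite | github.com/hypergraphman/YakovlevArtemEGE24 | task5/cc3.py | f
-- ===== SOURCE A (Python) =====
-- def f(n):
--     d1, d2, d3 = map(int, str(n))
--     b = [d1 * 10 + d2, d1 * 10 + d3,
--          d2 * 10 + d1, d2 * 10 + d3,
--          d3 * 10 + d1, d3 * 10 + d2]
--     a = []
--     for el in b:
--         if el > 9:
--             a.append(el)
--     return max(a) - min(a)
-- ===== SOURCE B (Python) =====
-- def f(n):
--     d1, d2, d3 = map(int, str(n))
--     s0, s1, s2 = sorted((d1, d2, d3))
--     max_val = 10 * s2 + s1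
--     if s0 > 0:
--         min_val = 10 * s0 + s1
--     elif s1 > 0:
--         min_val = 10 * s1
--     else:
--         min_val = 10 * s2
--     return max_val - min_val
-- ===== Notes on version B (the rewrite author's own statement) =====
-- stated objective: simpler
-- what changed: B sorts the three digits once and computes the max/min two-digit numbers by closed formulas (tens digit of the min forced nonzero) instead of building and scanning the six-pair list with a filter loop.
import Mathlib
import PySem

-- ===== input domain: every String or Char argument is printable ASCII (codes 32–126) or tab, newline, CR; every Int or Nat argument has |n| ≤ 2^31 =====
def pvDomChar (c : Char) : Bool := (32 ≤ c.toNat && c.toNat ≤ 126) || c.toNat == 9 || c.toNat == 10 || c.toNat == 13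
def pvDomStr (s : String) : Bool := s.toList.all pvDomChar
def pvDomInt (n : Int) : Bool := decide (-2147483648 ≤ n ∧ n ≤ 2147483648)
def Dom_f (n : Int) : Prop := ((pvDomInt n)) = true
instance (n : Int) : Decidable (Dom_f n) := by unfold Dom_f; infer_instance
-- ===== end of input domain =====

-- B replaces the six-pair build/filter/scan by sorting the three digits and a closed-form max/min (objective: simpler).

-- ===== PORT A =====
def f (n : Int) : Int :=
  match (PySem.Int.toStr n).toList.map (fun c => PySem.Int.ofStr? (String.mk [c])) with
  | [some d1, some d2, some d3] =>
    let b := [d1 * 10 + d2, d1 * 10 + d3,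
              d2 * 10 + d1, d2 * 10 + d3,
              d3 * 10 + d1, d3 * 10 + d2]
    let a := b.foldl (fun acc el => if el > 9 then acc ++ [el] else acc) []
    match PySem.List.max? a (fun x => x), PySem.List.min? a (fun x => x) with
    | some M, some m => M - m
    | _, _ => 0   -- unreachable inside Pre_f (a is nonempty there)
  | _ => 0        -- the triple unpack / int() raises outside Pre_f

-- ===== PORT B =====
def f_alt (n : Int) : Int :=
  let ds := (PySem.Int.toStr n).toList.map (fun c => PySem.Int.ofStr? (String.mk [c]))
  if ds.length = 3 then        -- the triple unpack d1, d2, d3 = map(int, str(n))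
    match (ds.getD 0 none).bind (fun d1 => (ds.getD 1 none).bind (fun d2 =>
          (ds.getD 2 none).map (fun d3 => (d1, d2, d3)))) with
    | some (d1, d2, d3) =>
      let s := PySem.List.sorted [d1, d2, d3] (fun x => x)
      let s0 := s.getD 0 0     -- s0, s1, s2 = sorted((d1, d2, d3))
      let s1 := s.getD 1 0
      let s2 := s.getD 2 0
      let maxVal := 10 * s2 + s1
      let minVal := if s0 > 0 then 10 * s0 + s1 else if s1 > 0 then 10 * s1 else 10 * s2
      maxVal - minVal
    | none => 0                -- int(c) raises outside Pre_f
  else 0                       -- unpack raises outside Pre_f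

-- ===== PRECONDITION & SPEC =====
-- Pre_f: exactly the inputs where str(n) is three digit characters, i.e. the
-- triple unpack of map(int, str(n)) succeeds; elsewhere A raises ValueError.
def Pre_f (n : Int) : Prop := 100 ≤ n ∧ n ≤ 999
instance (n : Int) : Decidable (Pre_f n) := by unfold Pre_f; infer_instance
def pvWitness_f : Int := 207
def Spec_f (n : Int) (out : Int) : Prop := out = f_alt n
instance (n : Int) (out : Int) : Decidable (Spec_f n out) := by unfold Spec_f; infer_instance

-- ===== CLAIM (what is proved, stated in full; the proofs are below) =====
def Claim_equal_f : Prop := ∀ (n : Int), Dom_f n → Pre_f n → Spec_f n (f n)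

-- ===== LEMMAS AND PROOFS =====
set_option maxHeartbeats 4000000 in
set_option maxRecDepth 10000 in
theorem f_eq_alt_nat : ∀ m : Nat, m < 900 → f ((m + 100 : Nat) : Int) = f_alt ((m + 100 : Nat) : Int) := by
  decide

-- ===== VERDICT =====
theorem f_spec : Claim_equal_f := by
  intro n _ hpre
  obtain ⟨h1, h2⟩ := hpre
  have hm : ∃ m : Nat, m < 900 ∧ n = ((m + 100 : Nat) : Int) := by
    refine ⟨(n - 100).toNat, by omega, by omega⟩
  obtain ⟨m, hm1, hm2⟩ := hm
  subst hm2
  exact f_eq_alt_nat m hm1
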